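-- pv_equiv track=rewrite | github.com/redhat-cip/python-dciclient | dciclient/v1/tablify.py | create_line_content
-- ===== SOURCE A (Python) =====
-- def create_line_content(substrings):
--     lines = []
--     line = []
--     max_length = max([len(item) for item in substrings])
--     i = 0
--     while max_length > 0:
--         for item in substrings:
--             try:
--                 line.append(item[i])
--             except IndexError:
--                 line.append(" ")
--             continue
--         lines.append(line)
--         line = []
--         max_length -= 1
--         i += 1
--
--     return lines
-- ===== SOURCE B (Python) =====
-- def create_line_content(substrings):
--     length = max(len(s) for s in substrings)
--     padded = [s.ljust(length) for s in substrings]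
--     return [list(col) for col in zip(*padded)]
-- ===== Notes on version B (the rewrite author's own statement) =====
-- stated objective: simpler
-- what changed: Replaces the index-by-index while loop with try/except IndexError padding by a pad-then-transpose pipeline: ljust every string to the max length, then zip(*padded) yields the columns.
import Mathlib
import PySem

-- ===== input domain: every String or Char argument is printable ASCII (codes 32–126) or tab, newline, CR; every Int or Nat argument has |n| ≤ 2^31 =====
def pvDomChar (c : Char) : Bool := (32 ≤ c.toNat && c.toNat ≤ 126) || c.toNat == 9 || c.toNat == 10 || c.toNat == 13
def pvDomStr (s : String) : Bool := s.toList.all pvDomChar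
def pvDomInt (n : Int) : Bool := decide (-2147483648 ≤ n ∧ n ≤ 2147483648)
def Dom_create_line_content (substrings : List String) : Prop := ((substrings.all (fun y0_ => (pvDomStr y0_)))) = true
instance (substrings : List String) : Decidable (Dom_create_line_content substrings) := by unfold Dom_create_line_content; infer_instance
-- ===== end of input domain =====

-- B replaces A's indexed while loop with try/except padding by a pad-then-transpose pipeline (ljust to the max length, then take columns); objective: simpler.


-- ===== PORT A =====
-- one pass of 'for item in substrings: try line.append(item[i]) except IndexError: line.append(" ")'
def pvRowA (substrings : List String) (i : Nat) : List String :=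
  substrings.foldl (fun line item =>
    match PySem.Str.pyGet? item (i : Int) with
    | some c => line ++ [String.ofList [c]]
    | none => line ++ [" "]) []

-- the 'while max_length > 0' loop, fuel = remaining max_length
def pvLoopA (substrings : List String) : Nat → Nat → List (List String) → List (List String)
  | 0, _, lines => lines
  | m+1, i, lines => pvLoopA substrings m (i+1) (lines ++ [pvRowA substrings i])

def create_line_content (substrings : List String) : List (List String) :=
  match PySem.List.max? (substrings.map PySem.Str.len) (fun x => x) with
  | none => []  -- Python raises ValueError here; excluded by Pre_
  | some m => pvLoopA substrings m.toNat 0 []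

-- ===== PORT B =====
def pvLjust (s : String) (n : Nat) : String :=
  String.ofList (s.toList ++ List.replicate (n - s.toList.length) ' ')

def create_line_content_alt (substrings : List String) : List (List String) :=
  match PySem.List.max? (substrings.map PySem.Str.len) (fun x => x) with
  | none => []  -- Python raises ValueError here; excluded by Pre_
  | some L =>
    let padded := substrings.map (fun s => pvLjust s L.toNat)
    -- zip(*padded): columns up to the shortest row (all rows equal length here)
    let n := ((padded.map (fun s => s.toList.length)).min?).getD 0
    (List.range n).map (fun j => padded.map (fun s => String.ofList [s.toList.getD j ' ']))

-- ===== PRECONDITION & SPEC =====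
-- Pre_ excludes the empty list, on which Python's max([]) raises ValueError in both A and B.
def Pre_create_line_content (substrings : List String) : Prop := substrings ≠ []
instance (substrings : List String) : Decidable (Pre_create_line_content substrings) := by unfold Pre_create_line_content; infer_instance
def pvWitness_create_line_content : List String := ["ab", "c"]

def Spec_create_line_content (substrings : List String) (out : List (List String)) : Prop := out = create_line_content_alt substrings
instance (substrings : List String) (out : List (List String)) : Decidable (Spec_create_line_content substrings out) := by unfold Spec_create_line_content; infer_instance

-- ===== CLAIM (what is proved, stated in full; the proofs are below) =====
def Claim_equal_create_line_content : Prop := ∀ (substrings : List String), Dom_create_line_content substrings → Pre_create_line_content substrings → Spec_create_line_content substrings (create_line_content substrings)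

-- ===== LEMMAS AND PROOFS =====

theorem pvLoopA_eq (substrings : List String) :
    ∀ (m i : Nat) (lines : List (List String)),
      pvLoopA substrings m i lines = lines ++ (List.range' i m).map (pvRowA substrings) := by
  intro m
  induction m with
  | zero => intro i lines; simp [pvLoopA]
  | succ k ih =>
    intro i lines
    simp [pvLoopA, ih, List.range'_succ]

theorem pvRowA_eq_map (substrings : List String) (i : Nat) :
    pvRowA substrings i = substrings.map (fun item =>
      match PySem.Str.pyGet? item (i : Int) with
      | some c => String.ofList [c]
      | none => " ") := by
  unfold pvRowA
  induction substrings using List.reverseRecOn with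
  | nil => rfl
  | append_singleton xs x ih =>
    simp only [List.foldl_append, List.foldl_cons, List.foldl_nil, List.map_append, List.map_cons,
      List.map_nil, ih]
    cases PySem.Str.pyGet? x (i : Int) <;> simp

theorem create_line_content_spec_aux (substrings : List String)
    (hne : substrings ≠ []) :
    create_line_content substrings = create_line_content_alt substrings := by
  unfold create_line_content create_line_content_alt
  obtain ⟨L, hL⟩ : ∃ L, PySem.List.max? (substrings.map PySem.Str.len) (fun x => x) = some L := by
    rcases h : PySem.List.max? (substrings.map PySem.Str.len) (fun x => x) with _ | L
    · exact absurd (by simpa using (PySem.List.max?_eq_none_iff _ _).mp h) hne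
    · exact ⟨L, rfl⟩
  rw [hL]
  simp only
  have hLmem : L ∈ substrings.map PySem.Str.len := PySem.List.max?_mem hL
  have hLnn : 0 ≤ L := by
    rcases List.mem_map.mp hLmem with ⟨s, _, hs⟩
    simp [PySem.Str.len_eq] at hs
    omega
  have hmax : ∀ s ∈ substrings, s.toList.length ≤ L.toNat := by
    intro s hs
    have := PySem.List.max?_isMax hL (PySem.Str.len s) (List.mem_map.mpr ⟨s, hs, rfl⟩)
    simp only [PySem.Str.len_eq] at this
    omega
  -- each padded string has length exactly L.toNat
  have hpadlen : ∀ s ∈ substrings, (pvLjust s L.toNat).toList.length = L.toNat := by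
    intro s hs
    have := hmax s hs
    simp only [pvLjust, String.toList_ofList, List.length_append, List.length_replicate]
    omega
  -- the min of the padded lengths is L.toNat
  have hmin : (((substrings.map (fun s => pvLjust s L.toNat)).map (fun s => s.toList.length)).min?).getD 0 = L.toNat := by
    have hrep : (substrings.map (fun s => pvLjust s L.toNat)).map (fun s => s.toList.length)
        = List.replicate substrings.length L.toNat := by
      rw [List.map_map]
      have : substrings.length = (substrings.map (fun s => pvLjust s L.toNat)).length := by simp
      rw [show List.replicate substrings.length L.toNat
            = List.replicate ((substrings.map ((fun s => s.toList.length) ∘ fun s => pvLjust s L.toNat))).length L.toNat by simp]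
      simpa using List.map_eq_replicate_iff.mpr (fun s hs => hpadlen s hs)
    rw [hrep, List.min?_replicate]
    have : substrings.length ≠ 0 := fun h => hne (List.eq_nil_of_length_eq_zero h)
    simp [this]
  rw [hmin, pvLoopA_eq]
  simp only [List.nil_append, ← List.range_eq_range']
  apply List.map_congr_left
  intro j hj
  have hjL : j < L.toNat := List.mem_range.mp hj
  rw [pvRowA_eq_map]
  rw [List.map_map]
  apply List.map_congr_left
  intro s hs
  simp only [Function.comp_apply, PySem.Str.pyGet?_natCast]
  by_cases hlt : j < s.toList.length
  · rw [List.getElem?_eq_getElem hlt]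
    simp [pvLjust, List.getD, List.getElem?_append_left hlt, List.getElem?_eq_getElem hlt]
  · rw [List.getElem?_eq_none (by have h2 : s.toList.length = s.length := String.length_toList; omega)]
    have : (pvLjust s L.toNat).toList.getD j ' ' = ' ' := by
      have hlen := hmax s hs
      simp only [pvLjust, String.toList_ofList]
      rw [List.getD_eq_getElem?_getD, List.getElem?_append_right (by omega)]
      rw [List.getElem?_eq_getElem (by have h2 : s.toList.length = s.length := String.length_toList; simp; omega)]
      simp
    rw [this]

-- ===== VERDICT (by name: the statement is the Claim_ definition above) =====
theorem create_line_content_spec : Claim_equal_create_line_content := by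
  intro substrings _ hpre
  exact create_line_content_spec_aux substrings hpre
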